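-- pv_equiv track=rewrite | github.com/opsappcsteam/onboarding_repo | services/mds/mds_service.py | field_array_splitter
-- ===== SOURCE A (Python) =====
-- def field_array_splitter(table_name_column_array, field_column_array):
--     field_arrays = []
--     field_array = []
--     i = 0
--     while i < len(field_column_array):
--         if i == 0:
--             field_array.append(field_column_array[i])
--         elif table_name_column_array[i] == 'nan' and table_name_column_array[i - 1] == 'nan' or table_name_column_array[i] == 'nan' and table_name_column_array[i - 1] != 'nan':
--             field_array.append(field_column_array[i])
--         else:
--             field_arrays.append(field_array)
--             field_array = []
--             field_array.append(field_column_array[i])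
--         i += 1
--     field_arrays.append(field_array)
--     return field_arrays
-- ===== SOURCE B (Python) =====
-- def field_array_splitter(table_name_column_array, field_column_array):
--     n = len(field_column_array)
--     starts = [0] + [i for i in range(1, n) if table_name_column_array[i] != 'nan']
--     bounds = starts + [n]
--     return [field_column_array[a:b] for a, b in zip(bounds, bounds[1:])]
-- ===== Notes on version B (the rewrite author's own statement) =====
-- stated objective: simpler
-- what changed: Replaces A's index-walking accumulator loop that flushes a running group at each non-'nan' table entry with an up-front list of group-start indices plus a length sentinel, producing the groups as slices between consecutive bounds.
import Mathlib
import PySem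

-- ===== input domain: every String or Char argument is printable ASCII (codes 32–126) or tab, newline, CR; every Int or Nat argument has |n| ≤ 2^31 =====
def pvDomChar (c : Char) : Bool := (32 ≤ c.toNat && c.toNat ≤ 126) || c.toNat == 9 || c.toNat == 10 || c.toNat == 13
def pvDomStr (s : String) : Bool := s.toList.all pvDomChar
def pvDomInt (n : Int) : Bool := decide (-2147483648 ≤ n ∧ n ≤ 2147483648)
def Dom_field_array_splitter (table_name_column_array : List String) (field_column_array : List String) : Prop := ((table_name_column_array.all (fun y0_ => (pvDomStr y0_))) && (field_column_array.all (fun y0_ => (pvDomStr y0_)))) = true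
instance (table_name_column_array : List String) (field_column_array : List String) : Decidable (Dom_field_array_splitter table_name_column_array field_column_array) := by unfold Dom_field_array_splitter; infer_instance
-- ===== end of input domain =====

-- B computes group boundaries up front and slices, instead of A's running accumulator flushed on
-- boundaries; objective: simpler (same O(n) cost). Proof covers Pre_: inputs where Python A returns.


-- ===== PORT A =====
-- A's while loop, step for step; list indexing is ported as getD "" — exact on Pre_ inputs,
-- where every index A reads is in range (Python raises IndexError outside Pre_).
def field_array_splitter_go (tbl fld : List String) (i : Nat)
    (arrays : List (List String)) (cur : List String) : List (List String) :=
  if i < fld.length then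
    if i = 0 then
      field_array_splitter_go tbl fld (i + 1) arrays (cur ++ [fld.getD i ""])
    else if (tbl.getD i "" == "nan" && tbl.getD (i - 1) "" == "nan")
         || (tbl.getD i "" == "nan" && tbl.getD (i - 1) "" != "nan") then
      field_array_splitter_go tbl fld (i + 1) arrays (cur ++ [fld.getD i ""])
    else
      field_array_splitter_go tbl fld (i + 1) (arrays ++ [cur]) [fld.getD i ""]
  else arrays ++ [cur]
termination_by fld.length - i

def field_array_splitter (table_name_column_array : List String) (field_column_array : List String) : List (List String) :=
  field_array_splitter_go table_name_column_array field_column_array 0 [] []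

-- ===== PORT B =====
-- Source B step for step: range(1, n) is List.range' 1 (n-1); table indexing as getD "" (exact on Pre_,
-- indices 1..n-1 are in range there); the slice fld[a:b] with 0 ≤ a ≤ b is (fld.drop a).take (b-a),
-- exact for those bounds.
def field_array_splitter_alt (table_name_column_array : List String) (field_column_array : List String) : List (List String) :=
  let n := field_column_array.length
  let starts := 0 :: (List.range' 1 (n - 1)).filter
      (fun i => table_name_column_array.getD i "" != "nan")
  let bounds := starts ++ [n]
  (bounds.zip bounds.tail).map (fun p => (field_column_array.drop p.1).take (p.2 - p.1))

-- ===== PRECONDITION & SPEC =====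
-- Pre_ excludes exactly the inputs where Python A raises IndexError: a field list of length ≥ 2
-- whose table list is shorter (A reads table_name_column_array[i] for every 1 ≤ i < len(field)).
def Pre_field_array_splitter (table_name_column_array : List String) (field_column_array : List String) : Prop :=
  field_column_array.length ≤ 1 ∨ field_column_array.length ≤ table_name_column_array.length
instance (table_name_column_array : List String) (field_column_array : List String) : Decidable (Pre_field_array_splitter table_name_column_array field_column_array) := by unfold Pre_field_array_splitter; infer_instance
def pvWitness_field_array_splitter : List String × List String := (["nan", "t1", "nan"], ["a", "b", "c"])

def Spec_field_array_splitter (table_name_column_array : List String) (field_column_array : List String) (out : List (List String)) : Prop := out = field_array_splitter_alt table_name_column_array field_column_array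
instance (table_name_column_array : List String) (field_column_array : List String) (out : List (List String)) : Decidable (Spec_field_array_splitter table_name_column_array field_column_array out) := by unfold Spec_field_array_splitter; infer_instance

-- ===== CLAIM (what is proved, stated in full; the proofs are below) =====
def Claim_equal_field_array_splitter : Prop := ∀ (table_name_column_array : List String) (field_column_array : List String), Dom_field_array_splitter table_name_column_array field_column_array → Pre_field_array_splitter table_name_column_array field_column_array → Spec_field_array_splitter table_name_column_array field_column_array (field_array_splitter table_name_column_array field_column_array)

-- ===== LEMMAS AND PROOFS =====

-- boundary test at index i (a new group starts there when 0 < i)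
def pvBnd (tbl : List String) (i : Nat) : Bool := tbl.getD i "" != "nan"

-- append a prefix into the first group (A's pending accumulator merged into the rest)
def pvPrep (c : List String) : List (List String) → List (List String)
  | [] => [c]
  | g :: gs => (c ++ g) :: gs

-- the groups of fld[i..], assuming a group is open at i
def pvCore (tbl fld : List String) (i : Nat) : List (List String) :=
  if h : i < fld.length then
    if i + 1 < fld.length ∧ pvBnd tbl (i + 1) then
      [fld.getD i ""] :: pvCore tbl fld (i + 1)
    else
      pvPrep [fld.getD i ""] (pvCore tbl fld (i + 1))
  else [[]]
termination_by fld.length - i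

theorem pvPrep_prep (a b : List String) (l : List (List String)) :
    pvPrep a (pvPrep b l) = pvPrep (a ++ b) l := by
  cases l <;> simp [pvPrep]

theorem pvCore_ne_nil (tbl fld : List String) (i : Nat) : pvCore tbl fld i ≠ [] := by
  unfold pvCore
  split
  · split
    · simp
    · cases pvCore tbl fld (i + 1) <;> simp [pvPrep]
  · simp

theorem pvBool_simp (a b : Bool) : ((a && b) || (a && !b)) = a := by
  cases a <;> cases b <;> rfl

-- A's loop invariant
theorem goA_eq (tbl fld : List String) (i : Nat) (arrays : List (List String)) (cur : List String) :
    field_array_splitter_go tbl fld i arrays cur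
      = arrays ++ (if 0 < i ∧ i < fld.length ∧ pvBnd tbl i
                   then cur :: pvCore tbl fld i
                   else pvPrep cur (pvCore tbl fld i)) := by
  by_cases h : i < fld.length
  · rw [field_array_splitter_go, if_pos h]
    by_cases h0 : i = 0
    · subst h0
      rw [if_pos rfl, goA_eq tbl fld 1 arrays (cur ++ [fld.getD 0 ""])]
      conv_rhs => rw [pvCore, dif_pos h]
      by_cases hb : 0 + 1 < fld.length ∧ pvBnd tbl (0 + 1) = true
      · rw [if_pos hb, if_pos (by simpa using hb), if_neg (by simp)]
        simp [pvPrep]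
      · rw [if_neg hb, if_neg (by simpa using hb), if_neg (by simp), pvPrep_prep]
    · rw [if_neg h0]
      have hcond : ((tbl.getD i "" == "nan" && tbl.getD (i - 1) "" == "nan")
          || (tbl.getD i "" == "nan" && tbl.getD (i - 1) "" != "nan"))
          = (tbl.getD i "" == "nan") := by
        have := pvBool_simp (tbl.getD i "" == "nan") (tbl.getD (i - 1) "" == "nan")
        simpa [bne] using this
      rw [hcond]
      have hi0 : 0 < i := Nat.pos_of_ne_zero h0
      by_cases hnan : tbl.getD i "" == "nan"
      · -- not a boundary: keep accumulating
        rw [if_pos hnan, goA_eq tbl fld (i + 1) arrays (cur ++ [fld.getD i ""])]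
        conv_rhs => rw [pvCore, dif_pos h]
        have hbndf : pvBnd tbl i = false := by
          simp only [pvBnd, bne]
          simpa using hnan
        rw [if_neg (by simp [hbndf] : ¬ (0 < i ∧ i < fld.length ∧ pvBnd tbl i = true))]
        by_cases hb : i + 1 < fld.length ∧ pvBnd tbl (i + 1) = true
        · rw [if_pos hb, if_pos (by simpa using hb)]
          simp [pvPrep]
        · rw [if_neg hb, if_neg (by simpa using hb), pvPrep_prep]
      · -- boundary: flush
        rw [if_neg hnan, goA_eq tbl fld (i + 1) (arrays ++ [cur]) [fld.getD i ""]]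
        conv_rhs => rw [pvCore, dif_pos h]
        have hbndt : pvBnd tbl i = true := by
          simp only [pvBnd, bne]
          simpa using hnan
        rw [if_pos (⟨hi0, h, hbndt⟩ : 0 < i ∧ i < fld.length ∧ pvBnd tbl i = true)]
        by_cases hb : i + 1 < fld.length ∧ pvBnd tbl (i + 1) = true
        · rw [if_pos hb, if_pos (by simpa using hb)]
          simp
        · rw [if_neg hb, if_neg (by simpa using hb)]
          simp [pvPrep]
  · rw [field_array_splitter_go, pvCore]
    rw [if_neg h, dif_neg h]
    rw [if_neg (by simp [h] : ¬ (0 < i ∧ i < fld.length ∧ pvBnd tbl i = true))]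
    simp [pvPrep]
termination_by fld.length - i
decreasing_by all_goals omega

-- B-side: the zip-with-tail slicer
def pvSlices (fld : List String) : List Nat → List (List String)
  | bounds => (bounds.zip bounds.tail).map (fun p => (fld.drop p.1).take (p.2 - p.1))

theorem pvSlices_cons (fld : List String) (a b : Nat) (r : List Nat) :
    pvSlices fld (a :: b :: r) = (fld.drop a).take (b - a) :: pvSlices fld (b :: r) := by
  simp [pvSlices]

theorem drop_getD (fld : List String) (i : Nat) (h : i < fld.length) :
    fld.drop i = fld.getD i "" :: fld.drop (i + 1) := by
  rw [List.getD_eq_getElem _ _ h]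
  exact List.drop_eq_getElem_cons h

-- main B lemma: slicing from a start list reproduces pvCore
theorem pvSlices_eq_core (tbl fld : List String) (i : Nat) (h : i < fld.length) :
    pvSlices fld ((i :: (List.range' (i + 1) (fld.length - (i + 1))).filter (pvBnd tbl)) ++ [fld.length])
      = pvCore tbl fld i := by
  by_cases h1 : i + 1 < fld.length
  · have hr : List.range' (i + 1) (fld.length - (i + 1))
        = (i + 1) :: List.range' (i + 2) (fld.length - (i + 2)) := by
      have : fld.length - (i + 1) = (fld.length - (i + 2)) + 1 := by omega
      rw [this, List.range'_succ]
    rw [hr]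
    by_cases hb : pvBnd tbl (i + 1)
    · -- boundary at i+1: new group [fld[i]]
      rw [pvCore]
      rw [dif_pos h, if_pos (⟨h1, hb⟩ : i + 1 < fld.length ∧ pvBnd tbl (i + 1) = true)]
      rw [List.filter_cons_of_pos hb]
      simp only [List.cons_append]
      rw [pvSlices_cons]
      rw [← pvSlices_eq_core tbl fld (i + 1) h1]
      congr 1
      rw [drop_getD fld i h]
      simp
    · -- no boundary at i+1: fld[i] merges into the next group
      rw [pvCore]
      simp only [dif_pos h]
      have hnb : ¬ (i + 1 < fld.length ∧ pvBnd tbl (i + 1)) := by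
        intro hc; exact absurd hc.2 hb
      rw [if_neg hnb]
      rw [List.filter_cons_of_neg (by simpa using hb)]
      rw [← pvSlices_eq_core tbl fld (i + 1) h1]
      -- both sides are (head slice) :: same tail; the head of the bound list is ≥ i+2
      rcases hbl : (List.range' (i + 2) (fld.length - (i + 2))).filter (pvBnd tbl) with _ | ⟨b, rest⟩
      · -- no further boundaries: next bound is fld.length
        simp only [List.nil_append, List.cons_append]
        rw [pvSlices_cons, pvSlices_cons]
        have hg : (fld.drop i).take (fld.length - i)
            = fld.getD i "" :: (fld.drop (i + 1)).take (fld.length - (i + 1)) := by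
          rw [drop_getD fld i h]
          have : fld.length - i = (fld.length - (i + 1)) + 1 := by omega
          rw [this, List.take_succ_cons]
        simp [pvSlices, hg, pvPrep]
      · -- next bound is b ≥ i+2
        have hbmem : b ∈ List.range' (i + 2) (fld.length - (i + 2)) := by
          have : b ∈ (List.range' (i + 2) (fld.length - (i + 2))).filter (pvBnd tbl) := by
            rw [hbl]; exact List.mem_cons_self
          exact List.mem_of_mem_filter this
        have hble : i + 2 ≤ b := (List.mem_range'_1.mp hbmem).1
        simp only [List.cons_append]
        rw [pvSlices_cons, pvSlices_cons]
        have hg : (fld.drop i).take (b - i)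
            = fld.getD i "" :: (fld.drop (i + 1)).take (b - (i + 1)) := by
          rw [drop_getD fld i h]
          have : b - i = (b - (i + 1)) + 1 := by omega
          rw [this, List.take_succ_cons]
        simp [hg, pvPrep]
  · -- i is the last index: single group [fld[i]]
    have hlen : fld.length = i + 1 := by omega
    rw [pvCore]
    simp only [dif_pos h, if_neg (by omega : ¬ (i + 1 < fld.length ∧ pvBnd tbl (i + 1)))]
    have : fld.length - (i + 1) = 0 := by omega
    rw [this]
    simp only [List.range'_zero, List.filter_nil]
    simp only [List.cons_append, List.nil_append]
    rw [pvSlices_cons, pvCore]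
    simp only [dif_neg (by omega : ¬ i + 1 < fld.length)]
    have hg : (fld.drop i).take (fld.length - i) = [fld.getD i ""] := by
      rw [drop_getD fld i h]
      have h2 : fld.drop (i + 1) = [] := List.drop_of_length_le (by omega)
      have : fld.length - i = 1 := by omega
      rw [this, h2]
      rfl
    simp [pvSlices, hg, pvPrep]
termination_by fld.length - i
decreasing_by all_goals omega

theorem pvPrep_nil (l : List (List String)) (h : l ≠ []) : pvPrep [] l = l := by
  cases l with
  | nil => exact absurd rfl h
  | cons g gs => simp [pvPrep]

-- ===== VERDICT (by name: the statement is the Claim_ definition above) =====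
theorem field_array_splitter_spec : Claim_equal_field_array_splitter := by
  intro tbl fld _ _
  show field_array_splitter tbl fld = field_array_splitter_alt tbl fld
  have halt : field_array_splitter_alt tbl fld
      = pvSlices fld ((0 :: (List.range' 1 (fld.length - 1)).filter (pvBnd tbl)) ++ [fld.length]) := rfl
  unfold field_array_splitter
  rw [goA_eq, halt]
  rw [if_neg (by simp : ¬ (0 < 0 ∧ 0 < fld.length ∧ pvBnd tbl 0 = true))]
  rw [pvPrep_nil _ (pvCore_ne_nil tbl fld 0), List.nil_append]
  by_cases h0 : 0 < fld.length
  · simpa using (pvSlices_eq_core tbl fld 0 h0).symm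
  · have hz : fld.length = 0 := by omega
    rw [pvCore]
    simp [hz, pvSlices]
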